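-- pv_equiv track=rewrite | github.com/AP-MI-2021/lab-3-Gabi559 | main.py | get_longest_product_is_odd
-- ===== SOURCE A (Python) =====
-- def get_longest_product_is_odd(lsta):
--     '''
--     gaseste cea mai lunga segventa a caruia produsul e un nr impar (adica cea mai lunga segventa de nr impare)
--     :param lsta: lista de numere
--     :return: segventa cea mai lunga formata doar din nr impare
--     '''
--     list2 = []
--     listmax = []
--     x = 0
--     for x in lsta:
--         if x % 2 == 1:
--             list2.append(x)
--         else:
--             if len(list2) > len(listmax):
--                 listmax.clear()
--                 listmax.extend(list2)
--             list2.clear()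
--     if len(list2) > len(listmax):
--         listmax.clear()
--         listmax.extend(list2)
--     return listmax
-- ===== SOURCE B (Python) =====
-- def get_longest_product_is_odd(lsta):
--     # Two-level scan: consume the input as a stack, split out each maximal odd
--     # run in one inner loop, and keep the first strictly longest run.
--     best = []
--     stack = lsta[::-1]          # top of stack = front of the list
--     while stack:
--         if stack[-1] % 2 == 1:
--             run = []
--             while stack and stack[-1] % 2 == 1:
--                 run.append(stack.pop())
--             if len(run) > len(best):
--                 best = run
--         else:
--             stack.pop()
--     return best
-- ===== Notes on version B (the rewrite author's own statement) =====
-- stated objective: alternative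
-- what changed: Replaces A's single fold that grows a current-run list and a best list element by element with a two-level run-splitting scan: an inner loop extracts each maximal odd run whole from a stack of the remaining input, and the outer loop keeps the first strictly longest run.
import Mathlib
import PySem

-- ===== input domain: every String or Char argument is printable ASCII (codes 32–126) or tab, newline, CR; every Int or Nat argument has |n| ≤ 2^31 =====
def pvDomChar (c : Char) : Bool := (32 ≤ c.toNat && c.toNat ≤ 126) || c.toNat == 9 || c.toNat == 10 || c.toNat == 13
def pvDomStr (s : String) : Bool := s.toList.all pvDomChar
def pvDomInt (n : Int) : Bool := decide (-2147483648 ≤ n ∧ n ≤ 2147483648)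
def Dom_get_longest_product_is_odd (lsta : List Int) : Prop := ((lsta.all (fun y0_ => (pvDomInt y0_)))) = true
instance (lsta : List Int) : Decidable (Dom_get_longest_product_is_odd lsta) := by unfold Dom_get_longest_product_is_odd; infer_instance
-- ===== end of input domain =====

-- B replaces A's element-by-element fold by a two-level run-splitting scan (alternative decomposition, same cost).

-- ===== PORT A =====
-- literal transliteration of A's single loop: state (list2, listmax), then a final comparison
def get_longest_product_is_odd (lsta : List Int) : List Int :=
  let st := lsta.foldl (fun (st : List Int × List Int) x =>
      if PySem.Int.mod x 2 == 1 then (st.1 ++ [x], st.2)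
      else if st.1.length > st.2.length then (([] : List Int), st.1)
      else ([], st.2)) (([] : List Int), ([] : List Int))
  if st.1.length > st.2.length then st.1 else st.2

-- ===== PORT B =====
-- inner while-loop of Source B: pops the leading maximal odd run off the stack, returns (run, remaining stack)
def splitOdd : List Int → List Int × List Int
  | [] => ([], [])
  | x :: xs =>
    if PySem.Int.mod x 2 == 1 then
      let p := splitOdd xs
      (x :: p.1, p.2)
    else ([], x :: xs)

theorem splitOdd_snd_length_le (l : List Int) : (splitOdd l).2.length ≤ l.length := by
  induction l with
  | nil => simp [splitOdd]
  | cons x xs ih =>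
    by_cases h : (PySem.Int.mod x 2 == 1) = true
    · simp only [splitOdd, if_pos h]
      exact Nat.le_succ_of_le ih
    · simp only [splitOdd, if_neg h]
      exact Nat.le_refl _

theorem splitOdd_cons_odd (x : Int) (xs : List Int) (h : (PySem.Int.mod x 2 == 1) = true) :
    splitOdd (x :: xs) = (x :: (splitOdd xs).1, (splitOdd xs).2) := by
  simp only [splitOdd, if_pos h]

-- outer while-loop of Source B
def altGo (rest best : List Int) : List Int :=
  match rest with
  | [] => best
  | x :: xs =>
    if h : (PySem.Int.mod x 2 == 1) = true then
      let p := splitOdd (x :: xs)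
      altGo p.2 (if p.1.length > best.length then p.1 else best)
    else altGo xs best
termination_by rest.length
decreasing_by
  · rw [splitOdd_cons_odd x xs h]
    have := splitOdd_snd_length_le xs
    simpa using Nat.lt_succ_of_le this
  · simp

def get_longest_product_is_odd_alt (lsta : List Int) : List Int := altGo lsta []

-- ===== PRECONDITION & SPEC =====
def Spec_get_longest_product_is_odd (lsta : List Int) (out : List Int) : Prop := out = get_longest_product_is_odd_alt lsta
instance (lsta : List Int) (out : List Int) : Decidable (Spec_get_longest_product_is_odd lsta out) := by unfold Spec_get_longest_product_is_odd; infer_instance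

-- ===== CLAIM (what is proved, stated in full; the proofs are below) =====
def Claim_equal_get_longest_product_is_odd : Prop := ∀ (lsta : List Int), Dom_get_longest_product_is_odd lsta → Spec_get_longest_product_is_odd lsta (get_longest_product_is_odd lsta)

-- ===== LEMMAS AND PROOFS =====

-- A's loop body, named for the proofs (definitionally the lambda inside get_longest_product_is_odd)
def stepA (st : List Int × List Int) (x : Int) : List Int × List Int :=
  if PySem.Int.mod x 2 == 1 then (st.1 ++ [x], st.2)
  else if st.1.length > st.2.length then (([] : List Int), st.1)
  else ([], st.2)

theorem splitOdd_append (l : List Int) : (splitOdd l).1 ++ (splitOdd l).2 = l := by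
  induction l with
  | nil => simp [splitOdd]
  | cons x xs ih =>
    by_cases h : (PySem.Int.mod x 2 == 1) = true
    · simp only [splitOdd, if_pos h, List.cons_append, ih]
    · simp only [splitOdd, if_neg h, List.nil_append]

theorem splitOdd_fst_odd (l : List Int) : ∀ y ∈ (splitOdd l).1, (PySem.Int.mod y 2 == 1) = true := by
  induction l with
  | nil => simp [splitOdd]
  | cons x xs ih =>
    by_cases h : (PySem.Int.mod x 2 == 1) = true
    · simp only [splitOdd, if_pos h]
      intro y hy
      rcases List.mem_cons.mp hy with hy | hy
      · exact hy ▸ h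
      · exact ih y hy
    · simp only [splitOdd, if_neg h]
      intro y hy
      simp at hy

theorem splitOdd_snd_head (l : List Int) (e : Int) (zs : List Int)
    (h : (splitOdd l).2 = e :: zs) : ¬ ((PySem.Int.mod e 2 == 1) = true) := by
  induction l with
  | nil => simp [splitOdd] at h
  | cons x xs ih =>
    by_cases hx : (PySem.Int.mod x 2 == 1) = true
    · rw [splitOdd_cons_odd x xs hx] at h
      exact ih h
    · simp only [splitOdd, if_neg hx] at h
      injection h with h1 h2
      exact h1 ▸ hx

-- folding A's step over an all-odd run just appends the run to list2
theorem foldl_stepA_odd (run : List Int) (hodd : ∀ y ∈ run, (PySem.Int.mod y 2 == 1) = true) :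
    ∀ (l2 lm : List Int), run.foldl stepA (l2, lm) = (l2 ++ run, lm) := by
  induction run with
  | nil => intro l2 lm; simp
  | cons y ys ih =>
    intro l2 lm
    have hy : (PySem.Int.mod y 2 == 1) = true := hodd y (by simp)
    have hys : ∀ z ∈ ys, (PySem.Int.mod z 2 == 1) = true := fun z hz => hodd z (by simp [hz])
    simp only [List.foldl_cons, stepA, if_pos hy]
    rw [ih hys]
    simp

-- main invariant: running A's loop from ([], best) and finishing equals B's outer loop
theorem main_lemma : ∀ (n : Nat) (rest best : List Int), rest.length ≤ n →
    (let st := rest.foldl stepA (([] : List Int), best)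
     if st.1.length > st.2.length then st.1 else st.2) = altGo rest best := by
  intro n
  induction n with
  | zero =>
    intro rest best h
    have : rest = [] := List.eq_nil_of_length_eq_zero (Nat.le_zero.mp h)
    subst this
    simp [altGo]
  | succ m ih =>
    intro rest best h
    match rest with
    | [] => simp [altGo]
    | x :: xs =>
      by_cases hx : (PySem.Int.mod x 2 == 1) = true
      · -- odd head: split off the maximal run
        have hsplit := splitOdd_append (x :: xs)
        have hodd := splitOdd_fst_odd (x :: xs)
        have hrunx : (splitOdd (x :: xs)).1 = x :: (splitOdd xs).1 := by
          rw [splitOdd_cons_odd x xs hx]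
        have hfold : (x :: xs).foldl stepA (([] : List Int), best)
            = (splitOdd (x :: xs)).2.foldl stepA ((splitOdd (x :: xs)).1, best) := by
          conv_lhs => rw [← hsplit]
          rw [List.foldl_append, foldl_stepA_odd (splitOdd (x :: xs)).1 hodd]
          simp
        have haltgo : altGo (x :: xs) best
            = altGo (splitOdd (x :: xs)).2
                (if (splitOdd (x :: xs)).1.length > best.length then (splitOdd (x :: xs)).1 else best) := by
          rw [altGo]
          simp only [dif_pos hx]
        match hr : (splitOdd (x :: xs)).2 with
        | [] =>
          rw [hfold, hr, List.foldl_nil, haltgo, hr, altGo]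
        | e :: zs =>
          have he : ¬ ((PySem.Int.mod e 2 == 1) = true) := splitOdd_snd_head (x :: xs) e zs hr
          have hlen : zs.length ≤ m := by
            have h1 : (splitOdd (x :: xs)).1.length + (splitOdd (x :: xs)).2.length
                = xs.length + 1 := by
              have := congrArg List.length hsplit
              simpa using this
            have h2 : 1 ≤ (splitOdd (x :: xs)).1.length := by rw [hrunx]; simp
            rw [hr] at h1
            simp only [List.length_cons] at h1 ⊢
            simp only [List.length_cons] at h
            omega
          have hstep : stepA ((splitOdd (x :: xs)).1, best) e
              = ([], if (splitOdd (x :: xs)).1.length > best.length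
                     then (splitOdd (x :: xs)).1 else best) := by
            simp only [stepA, if_neg he]
            by_cases hc : (splitOdd (x :: xs)).1.length > best.length <;> simp [hc]
          rw [hfold, hr, List.foldl_cons, hstep, haltgo, hr]
          rw [show altGo (e :: zs) (if (splitOdd (x :: xs)).1.length > best.length
                     then (splitOdd (x :: xs)).1 else best)
              = altGo zs (if (splitOdd (x :: xs)).1.length > best.length
                     then (splitOdd (x :: xs)).1 else best) from by rw [altGo]; simp only [dif_neg he]]
          exact ih zs _ hlen
      · -- even head with empty list2: state unchanged
        have hstep : stepA (([] : List Int), best) x = ([], best) := by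
          simp only [stepA, if_neg hx]
          simp
        have hlen : xs.length ≤ m := by simp at h; omega
        rw [List.foldl_cons, hstep]
        rw [show altGo (x :: xs) best = altGo xs best from by rw [altGo]; simp only [dif_neg hx]]
        exact ih xs best hlen

-- ===== VERDICT (by name: the statement is the Claim_ definition above) =====
theorem get_longest_product_is_odd_spec : Claim_equal_get_longest_product_is_odd := by
  intro lsta _
  unfold Spec_get_longest_product_is_odd get_longest_product_is_odd get_longest_product_is_odd_alt
  exact main_lemma lsta.length lsta [] (Nat.le_refl _)
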